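-- pv_equiv track=rewrite | github.com/Zawiop/AI | Othello/Othello9A.py | leftToRight
-- ===== SOURCE A (Python) =====
-- def leftToRight(board): # diagonal 2
--
--     height = len(board)
--     width = len(board[0])
--     new_board = []
--     for i in range(width):
--         new_row = []
--         for j in range(height):
--             new_row.append(board[height - 1 - j][width - 1 - i])
--         new_board.append(new_row)
--     return new_board
-- ===== SOURCE B (Python) =====
-- def leftToRight(board): # diagonal 2: stream rows once into reversed column accumulators
--     cols = [[] for _ in board[0]]  # one accumulator per output row; raises IndexError on empty board, like A
--     for row in board:
--         for col, v in zip(reversed(cols), row):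
--             col.append(v)
--     return [col[::-1] for col in cols]
-- ===== Notes on version B (the rewrite author's own statement) =====
-- stated objective: alternative
-- what changed: B makes a single streaming pass over the input rows, distributing each row's values into per-output-row accumulators (paired against the reversed accumulator list) and reversing each accumulator at the end, instead of A's nested loops over output indices with h-1-j / w-1-i index arithmetic.
import Mathlib
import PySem

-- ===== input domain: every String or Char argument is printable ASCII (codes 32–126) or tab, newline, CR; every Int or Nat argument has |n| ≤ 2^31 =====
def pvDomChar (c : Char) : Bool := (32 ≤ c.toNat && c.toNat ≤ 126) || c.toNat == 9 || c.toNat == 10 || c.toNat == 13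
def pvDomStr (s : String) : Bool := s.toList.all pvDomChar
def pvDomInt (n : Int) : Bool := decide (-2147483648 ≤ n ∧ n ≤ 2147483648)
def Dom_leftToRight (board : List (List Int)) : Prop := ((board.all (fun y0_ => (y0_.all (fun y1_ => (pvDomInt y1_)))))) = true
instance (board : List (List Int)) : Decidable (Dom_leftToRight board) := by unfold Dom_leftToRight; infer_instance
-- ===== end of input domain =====

-- B streams the input rows once into per-output-row accumulators (no output-index arithmetic),
-- instead of A's nested loops over output indices (alternative decomposition; same cost).

-- ===== PORT A =====
def leftToRight (board : List (List Int)) : List (List Int) :=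
  let height : Int := board.length
  let width : Int := (PySem.List.pyGetD board 0 []).length
  (PySem.List.pyRange 0 width 1).foldl
    (fun new_board i =>
      new_board ++
        [(PySem.List.pyRange 0 height 1).foldl
          (fun new_row j =>
            new_row ++ [PySem.List.pyGetD (PySem.List.pyGetD board (height - 1 - j) []) (width - 1 - i) 0])
          []])
    []

-- ===== PORT B =====
-- the inner Python loop: zip(reversed(cols), row) appends row[k] to cols[len-1-k];
-- columns beyond len(row) keep their value (zip truncates), modelled by ++ drop.
def ltrStep (cols : List (List Int)) (row : List Int) : List (List Int) :=
  let rev := cols.reverse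
  ((rev.zipWith (fun c v => c ++ [v]) row) ++ rev.drop row.length).reverse

def leftToRight_alt (board : List (List Int)) : List (List Int) :=
  let cols := (PySem.List.pyGetD board 0 []).map (fun _ => ([] : List Int))
  let cols := board.foldl ltrStep cols
  cols.map List.reverse   -- col[::-1]

-- ===== PRECONDITION & SPEC =====
-- Pre_ excludes exactly the inputs on which A raises IndexError: the empty board (board[0])
-- and boards where some row is shorter than the first row (board[h-1-j][w-1-i] out of range).
def Pre_leftToRight (board : List (List Int)) : Prop :=
  board ≠ [] ∧ ∀ r ∈ board, (PySem.List.pyGetD board 0 []).length ≤ r.length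
instance (board : List (List Int)) : Decidable (Pre_leftToRight board) := by
  unfold Pre_leftToRight; infer_instance
def pvWitness_leftToRight : List (List Int) := [[1, 2, 3], [4, 5, 6]]

def Spec_leftToRight (board : List (List Int)) (out : List (List Int)) : Prop := out = leftToRight_alt board
instance (board : List (List Int)) (out : List (List Int)) : Decidable (Spec_leftToRight board out) := by unfold Spec_leftToRight; infer_instance

-- ===== CLAIM (what is proved, stated in full; the proofs are below) =====
def Claim_equal_leftToRight : Prop := ∀ (board : List (List Int)), Dom_leftToRight board → Pre_leftToRight board → Spec_leftToRight board (leftToRight board)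

-- ===== LEMMAS AND PROOFS =====

-- one step of B on columns in canonical form, when the row is long enough
theorem ltrStep_eq (w : Nat) (g : Nat → List Int) (row : List Int) (hrow : w ≤ row.length) :
    ltrStep ((List.range w).map g) row =
      (List.range w).map (fun i => g i ++ [row.getD (w - 1 - i) 0]) := by
  unfold ltrStep
  apply List.ext_getElem
  · simp [Nat.min_eq_left hrow]; omega
  · intro i h1 h2
    have hlen : (((List.range w).map g).reverse.zipWith (fun c v => c ++ [v]) row).length = w := by
      simp; omega
    have hdrop : (((List.range w).map g).reverse).drop row.length = [] := by
      apply List.drop_eq_nil_of_le; simp; omega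
    simp only [hdrop, List.append_nil, List.getElem_reverse, hlen] at *
    have hi : i < w := by simpa [hlen] using h2
    rw [List.getElem_zipWith]
    simp only [List.getElem_reverse, List.length_map, List.length_range, List.getElem_map,
      List.getElem_range]
    rw [List.getD_eq_getElem row 0 (by omega)]
    congr 2
    omega

-- folding B's step over rows (all long enough) extends every accumulator in order
theorem foldl_ltrStep (rows : List (List Int)) (w : Nat)
    (hlen : ∀ r ∈ rows, w ≤ r.length) :
    ∀ g : Nat → List Int,
      rows.foldl ltrStep ((List.range w).map g) =
        (List.range w).map (fun i => g i ++ rows.map (fun r => r.getD (w - 1 - i) 0)) := by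
  induction rows with
  | nil => intro g; simp
  | cons r rs ih =>
    intro g
    simp only [List.foldl_cons]
    rw [ltrStep_eq w g r (hlen r (by simp))]
    rw [ih (fun r' hr' => hlen r' (by simp [hr'])) (fun i => g i ++ [r.getD (w - 1 - i) 0])]
    simp

-- reversing the row order turns getD (len-1-j) into a plain map over the reverse
theorem map_range_getD_rev (bs : List (List Int)) (f : List Int → Int) :
    (List.range bs.length).map (fun j => f (bs.getD (bs.length - 1 - j) [])) =
      bs.reverse.map f := by
  apply List.ext_getElem
  · simp
  · intro j h1 h2
    simp only [List.getElem_map, List.getElem_range, List.getElem_reverse]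
    simp only [List.length_map, List.length_range] at h1
    rw [List.getD_eq_getElem bs [] (by omega)]

theorem main_eq (board : List (List Int)) (_hne : board ≠ [])
    (hlen : ∀ r ∈ board, (PySem.List.pyGetD board 0 []).length ≤ r.length) :
    leftToRight board = leftToRight_alt board := by
  set w : Nat := (PySem.List.pyGetD board 0 []).length with hw
  set h : Nat := board.length with hh
  -- normalize A to a nested map over Nat ranges
  have hA : leftToRight board =
      (List.range w).map (fun i => (List.range h).map
        (fun j => (board.getD (h - 1 - j) []).getD (w - 1 - i) 0)) := by
    show (PySem.List.pyRange 0 (w : Int) 1).foldl _ [] = _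
    simp only [PySem.List.foldl_append_singleton_eq_map, List.nil_append,
      PySem.List.pyRange_zero_natCast, List.map_map]
    apply List.map_congr_left
    intro k hk
    simp only [Function.comp_apply]
    apply List.map_congr_left
    intro j hj
    simp only [Function.comp_apply]
    rw [List.mem_range] at hk hj
    have e1 : (h : Int) - 1 - (j : Int) = ((h - 1 - j : Nat) : Int) := by omega
    have e2 : (w : Int) - 1 - (k : Int) = ((w - 1 - k : Nat) : Int) := by omega
    rw [e1, e2, PySem.List.pyGetD_natCast, PySem.List.pyGetD_natCast]
  -- normalize B to the same nested map
  have hB : leftToRight_alt board =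
      (List.range w).map (fun i => (List.range h).map
        (fun j => (board.getD (h - 1 - j) []).getD (w - 1 - i) 0)) := by
    show (board.foldl ltrStep ((PySem.List.pyGetD board 0 []).map (fun _ => ([] : List Int)))).map List.reverse = _
    have hinit : (PySem.List.pyGetD board 0 []).map (fun _ => ([] : List Int)) =
        (List.range w).map (fun _ => ([] : List Int)) := by
      apply List.ext_getElem <;> simp [hw]
    rw [hinit, foldl_ltrStep board w hlen (fun _ => [])]
    simp only [List.map_map, List.nil_append]
    apply List.map_congr_left
    intro i _
    simp only [Function.comp_apply]
    rw [hh, map_range_getD_rev board (fun r => r.getD (w - 1 - i) 0), List.map_reverse]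
  rw [hA, hB]

-- ===== VERDICT (by name: the statement is the Claim_ definition above) =====
theorem leftToRight_spec : Claim_equal_leftToRight := by
  intro board _ hpre
  unfold Spec_leftToRight
  exact main_eq board hpre.1 hpre.2
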